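-- pv_equiv track=rewrite | github.com/AnnemetteBP/brainsurgery | brainsurgery/synapse/axon/lowering_core.py | _canonical_op_name
-- ===== SOURCE A (Python) =====
-- _PRIMITIVE_NAME_ALIASES: dict[str, str] = {
--     "_repeat": "repeat",
--     "_list_init": "list_init",
--     "_list_index": "list_index",
--     "_list_append": "list_append",
--     "_moe_select": "moe_select",
-- }
--
-- _CACHE_PRIMITIVE_ALIASES: dict[str, str] = {
--     "update": "cache_update",
--     "seq_len": "cache_seq_len",
-- }
--
-- def _canonical_op_name(callee: str) -> str:
--     base = callee.split("@", 1)[0] if "@" in callee else callee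
--     if base.startswith("_cache_"):
--         cache_suffix = base[len("_cache_") :]
--         alias = _CACHE_PRIMITIVE_ALIASES.get(cache_suffix)
--         if alias is not None:
--             return alias
--         raise ValueError(f"unsupported cache primitive alias: {base!r}")
--     alias = _PRIMITIVE_NAME_ALIASES.get(base)
--     if alias is not None:
--         return alias
--     if base.startswith("_") and len(base) > 1 and base[1].isalpha():
--         return _canonical_op_name(base[1:])
--     return base
-- ===== SOURCE B (Python) =====
-- _PRIMITIVE_NAME_ALIASES: dict[str, str] = {
--     "_repeat": "repeat",
--     "_list_init": "list_init",
--     "_list_index": "list_index",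
--     "_list_append": "list_append",
--     "_moe_select": "moe_select",
-- }
--
-- _CACHE_PRIMITIVE_ALIASES: dict[str, str] = {
--     "update": "cache_update",
--     "seq_len": "cache_seq_len",
-- }
--
--
-- def _canonical_op_name(callee: str) -> str:
--     # Every alias table of the original is redundant: each primitive alias value,
--     # and each cache alias value, is exactly the key/name with its single leading
--     # underscore removed, and the original's recursion can strip at most once
--     # (after one strip the name starts with a letter, so no branch fires again).
--     # So the whole function collapses to: validate cache names, then strip one
--     # leading underscore when it is followed by a letter.  No dictionaries.
--     base = callee.partition("@")[0]
--     if base.startswith("_cache_"):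
--         if base[7:] not in ("update", "seq_len"):
--             raise ValueError(f"unsupported cache primitive alias: {base!r}")
--         return base[1:]
--     if len(base) > 1 and base[0] == "_" and base[1].isalpha():
--         return base[1:]
--     return base
-- ===== Notes on version B (the rewrite author's own statement) =====
-- stated objective: simpler
-- what changed: Drops both alias dictionaries entirely: every alias value is the key with its leading underscore removed and the original recursion strips at most once, so B becomes a straight-line validate-then-strip-one-underscore function with no tables and no recursion.
-- outside the precondition, e.g. on _canonical_op_name('_cache_'): A raises ValueError, B raises ValueError
import Mathlib
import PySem

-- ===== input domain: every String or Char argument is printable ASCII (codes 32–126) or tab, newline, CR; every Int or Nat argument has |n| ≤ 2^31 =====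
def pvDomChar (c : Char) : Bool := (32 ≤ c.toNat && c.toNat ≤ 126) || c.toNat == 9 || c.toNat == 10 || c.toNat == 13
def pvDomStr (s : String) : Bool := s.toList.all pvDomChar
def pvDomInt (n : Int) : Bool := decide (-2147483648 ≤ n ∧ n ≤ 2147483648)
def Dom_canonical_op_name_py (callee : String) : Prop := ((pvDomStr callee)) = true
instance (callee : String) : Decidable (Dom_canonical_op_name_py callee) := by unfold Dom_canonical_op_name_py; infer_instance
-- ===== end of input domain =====

-- B drops both alias dictionaries (every alias value is its key minus the leading underscore and
-- A's recursion strips at most once), becoming a straight-line validate-then-strip function; simpler.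

-- ===== PORT A =====
-- dict literals of A's module (Dict.mk: keys are distinct literals)
def pvPrimAliases : PySem.Dict (List Char) (List Char) := PySem.Dict.mk
  [ (['_','r','e','p','e','a','t'], ['r','e','p','e','a','t'])
  , (['_','l','i','s','t','_','i','n','i','t'], ['l','i','s','t','_','i','n','i','t'])
  , (['_','l','i','s','t','_','i','n','d','e','x'], ['l','i','s','t','_','i','n','d','e','x'])
  , (['_','l','i','s','t','_','a','p','p','e','n','d'], ['l','i','s','t','_','a','p','p','e','n','d'])
  , (['_','m','o','e','_','s','e','l','e','c','t'], ['m','o','e','_','s','e','l','e','c','t']) ]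

def pvCacheAliases : PySem.Dict (List Char) (List Char) := PySem.Dict.mk
  [ (['u','p','d','a','t','e'], ['c','a','c','h','e','_','u','p','d','a','t','e'])
  , (['s','e','q','_','l','e','n'], ['c','a','c','h','e','_','s','e','q','_','l','e','n']) ]

-- callee.split("@", 1)[0] ported by hand as takeWhile (· ≠ '@'): the first piece of the split is
-- exactly the characters before the first '@' (exact; used only under the 'isIn' guard in A).
-- the assignment 'base = callee.split("@", 1)[0] if "@" in callee else callee'
def pvBaseA (cs : List Char) : List Char :=
  if PySem.Chars.isIn ['@'] cs then cs.takeWhile (· ≠ '@') else cs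

theorem pvBaseA_length_le (cs : List Char) : (pvBaseA cs).length ≤ cs.length := by
  unfold pvBaseA; split
  · exact (List.takeWhile_prefix _).length_le
  · exact le_refl _

def pvCanonA (cs : List Char) : List Char :=
  let base := pvBaseA cs
  if PySem.Chars.startswith base ['_','c','a','c','h','e','_'] then
    match PySem.Dict.get? pvCacheAliases (base.drop 7) with
    | some a => a
    | none => ['!']   -- Python raises ValueError here; unreachable under Pre_
  else
    match PySem.Dict.get? pvPrimAliases base with
    | some a => a
    | none =>
      if h : (PySem.Chars.startswith base ['_'] && decide (1 < base.length)
              && PySem.Chars.isalpha ((PySem.List.pyGet? base 1).getD ' ')) = true then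
        pvCanonA (base.drop 1)
      else base
termination_by cs.length
decreasing_by
  simp only [Bool.and_eq_true, decide_eq_true_eq] at h
  have hb : (pvBaseA cs).length ≤ cs.length := pvBaseA_length_le cs
  have h2 : 1 < (pvBaseA cs).length := h.1.2
  simp only [List.length_drop]
  omega

def canonical_op_name_py (callee : String) : String :=
  String.ofList (pvCanonA callee.toList)

-- ===== PORT B =====
-- callee.partition("@")[0] ported by hand as takeWhile (· ≠ '@'): the part before the first '@' (exact).
-- No tables: validate cache names, then strip one leading underscore followed by a letter.
def pvCanonB (base : List Char) : List Char :=
  if PySem.Chars.startswith base ['_','c','a','c','h','e','_'] then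
    -- 'base[7:] not in ("update", "seq_len"): raise' — the raise is excluded by Pre_
    if base.drop 7 = ['u','p','d','a','t','e'] ∨ base.drop 7 = ['s','e','q','_','l','e','n'] then
      base.drop 1
    else []
  else if decide (1 < base.length) && ((PySem.List.pyGet? base 0).getD ' ' == '_')
       && PySem.Chars.isalpha ((PySem.List.pyGet? base 1).getD ' ') then
    base.drop 1
  else base

def canonical_op_name_py_alt (callee : String) : String :=
  String.ofList (pvCanonB (callee.toList.takeWhile (· ≠ '@')))

-- ===== PRECONDITION & SPEC =====
-- Pre_ excludes exactly the inputs on which Python A raises ValueError: those whose part before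
-- the first '@' starts with "_cache_" but whose suffix is not a supported cache alias key.
def Pre_canonical_op_name_py (callee : String) : Prop :=
  ['_','c','a','c','h','e','_'] <+: callee.toList.takeWhile (· ≠ '@') →
    ((callee.toList.takeWhile (· ≠ '@')).drop 7 = ['u','p','d','a','t','e'] ∨
     (callee.toList.takeWhile (· ≠ '@')).drop 7 = ['s','e','q','_','l','e','n'])
instance (callee : String) : Decidable (Pre_canonical_op_name_py callee) := by
  unfold Pre_canonical_op_name_py; infer_instance
def pvWitness_canonical_op_name_py : String := "_repeat@layer0"

def Spec_canonical_op_name_py (callee : String) (out : String) : Prop := out = canonical_op_name_py_alt callee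
instance (callee : String) (out : String) : Decidable (Spec_canonical_op_name_py callee out) := by unfold Spec_canonical_op_name_py; infer_instance

-- ===== CLAIM (what is proved, stated in full; the proofs are below) =====
def Claim_equal_canonical_op_name_py : Prop := ∀ (callee : String), Dom_canonical_op_name_py callee → Pre_canonical_op_name_py callee → Spec_canonical_op_name_py callee (canonical_op_name_py callee)

-- ===== LEMMAS AND PROOFS =====

theorem pv_alpha_ne (c : Char) (h : PySem.Chars.isalpha c = true) : c ≠ '_' := by
  rintro rfl; exact absurd h (by decide)

theorem pv_base_eq (cs : List Char) : pvBaseA cs = cs.takeWhile (· ≠ '@') := by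
  unfold pvBaseA; split
  · rfl
  · next h =>
    have h2 : '@' ∉ cs := by
      rw [← List.singleton_infix_iff]
      intro hin
      exact h ((PySem.Chars.isIn_iff_infix _ _).mpr hin)
    exact (List.takeWhile_eq_self_iff.mpr (by
      intro x hx; simp only [decide_eq_true_eq]; rintro rfl; exact h2 hx)).symm

theorem pv_no_at (cs : List Char) : '@' ∉ cs.takeWhile (· ≠ '@') := by
  intro h
  have := List.mem_takeWhile_imp h
  simp at this

theorem pv_sw1 (c : Char) (t : List Char) (h : c ≠ '_') (p : List Char) :
    PySem.Chars.startswith (c :: t) ('_' :: p) = false := by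
  rw [Bool.eq_false_iff]
  intro hs
  exact h (List.cons_prefix_cons.mp ((PySem.Chars.startswith_iff _ _).mp hs)).1.symm

theorem pv_prim_none (c : Char) (t : List Char) (h : c ≠ '_') :
    PySem.Dict.get? pvPrimAliases (c :: t) = none := by
  have h5 : ∀ p : List Char, (('_' :: p : List Char) == c :: t) = false := by
    intro p
    rw [beq_eq_false_iff_ne]
    intro he
    injection he with h1 _
    exact h h1.symm
  simp [pvPrimAliases, h5, PySem.Dict.get?]

theorem pv_get1 (a b : Char) (t : List Char) : PySem.List.pyGet? (a :: b :: t) 1 = some b := by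
  simp [PySem.List.pyGet?, PySem.List.pyIdx?]

theorem pv_cond_eq (b : List Char) :
    (PySem.Chars.startswith b ['_'] && decide (1 < b.length)
      && PySem.Chars.isalpha ((PySem.List.pyGet? b 1).getD ' '))
    = (decide (1 < b.length) && ((PySem.List.pyGet? b 0).getD ' ' == '_')
      && PySem.Chars.isalpha ((PySem.List.pyGet? b 1).getD ' ')) := by
  rcases b with _ | ⟨c0, _ | ⟨c1, t⟩⟩
  · simp [PySem.Chars.startswith, PySem.List.pyGet?]
  · simp [PySem.Chars.startswith, PySem.List.pyGet?]
  · by_cases h : c0 = '_'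
    · simp [PySem.Chars.startswith, List.isPrefixOf, h]
    · have e1 : ('_' == c0) = false := beq_eq_false_iff_ne.mpr (fun he => h he.symm)
      have e2 : (c0 == '_') = false := beq_eq_false_iff_ne.mpr h
      simp [PySem.Chars.startswith, List.isPrefixOf, e1, e2]

theorem pv_fix (c : Char) (t : List Char) (hno : '@' ∉ c :: t)
    (ha : PySem.Chars.isalpha c = true) : pvCanonA (c :: t) = c :: t := by
  have hc : c ≠ '_' := pv_alpha_ne c ha
  have hb : pvBaseA (c :: t) = c :: t := by
    rw [pv_base_eq]
    exact List.takeWhile_eq_self_iff.mpr (by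
      intro x hx; simp only [decide_eq_true_eq]; rintro rfl; exact hno hx)
  rw [pvCanonA]
  simp only [hb, pv_sw1 c t hc, pv_prim_none c t hc, Bool.false_and]
  simp

-- if the primitive-alias lookup hits, the key is one of the five literal keys with its value
theorem pv_prim_cases (b a : List Char) (hm : PySem.Dict.get? pvPrimAliases b = some a) :
    (b = ['_','r','e','p','e','a','t'] ∧ a = ['r','e','p','e','a','t']) ∨
    (b = ['_','l','i','s','t','_','i','n','i','t'] ∧ a = ['l','i','s','t','_','i','n','i','t']) ∨
    (b = ['_','l','i','s','t','_','i','n','d','e','x'] ∧ a = ['l','i','s','t','_','i','n','d','e','x']) ∨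
    (b = ['_','l','i','s','t','_','a','p','p','e','n','d'] ∧ a = ['l','i','s','t','_','a','p','p','e','n','d']) ∨
    (b = ['_','m','o','e','_','s','e','l','e','c','t'] ∧ a = ['m','o','e','_','s','e','l','e','c','t']) := by
  simp only [pvPrimAliases, PySem.Dict.get?_mk_cons] at hm
  split_ifs at hm with h1 h2 h3 h4 h5 <;>
    first
    | (simp only [Option.some.injEq] at hm
       first
       | exact Or.inl ⟨(beq_iff_eq.mp h1).symm, hm.symm⟩
       | exact Or.inr (Or.inl ⟨(beq_iff_eq.mp h2).symm, hm.symm⟩)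
       | exact Or.inr (Or.inr (Or.inl ⟨(beq_iff_eq.mp h3).symm, hm.symm⟩))
       | exact Or.inr (Or.inr (Or.inr (Or.inl ⟨(beq_iff_eq.mp h4).symm, hm.symm⟩)))
       | exact Or.inr (Or.inr (Or.inr (Or.inr ⟨(beq_iff_eq.mp h5).symm, hm.symm⟩))))
    | simp [PySem.Dict.get?] at hm

theorem pv_main : ∀ cs : List Char,
    (['_','c','a','c','h','e','_'] <+: cs.takeWhile (· ≠ '@') →
      ((cs.takeWhile (· ≠ '@')).drop 7 = ['u','p','d','a','t','e'] ∨
       (cs.takeWhile (· ≠ '@')).drop 7 = ['s','e','q','_','l','e','n'])) →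
    pvCanonA cs = pvCanonB (cs.takeWhile (· ≠ '@')) := by
  intro cs hP
  rw [pvCanonA]
  rw [pv_base_eq]
  unfold pvCanonB
  by_cases h1 : PySem.Chars.startswith (cs.takeWhile (· ≠ '@')) ['_','c','a','c','h','e','_'] = true
  · obtain ⟨t, ht⟩ := (PySem.Chars.startswith_iff _ _).mp h1
    have hb : cs.takeWhile (· ≠ '@') = ['_','c','a','c','h','e','_'] ++ t := ht.symm
    have hd : (cs.takeWhile (· ≠ '@')).drop 7 = t := by rw [hb]; rfl
    rcases hP ((PySem.Chars.startswith_iff _ _).mp h1) with h | h <;>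
      (rw [hd] at h; subst h; rw [if_pos h1, if_pos h1, hb]; decide)
  · simp only [Bool.not_eq_true] at h1
    simp only [h1, Bool.false_eq_true, if_neg, not_false_iff]
    cases hm : PySem.Dict.get? pvPrimAliases (cs.takeWhile (· ≠ '@')) with
    | some a =>
      rcases pv_prim_cases _ _ hm with ⟨hb, ha⟩ | ⟨hb, ha⟩ | ⟨hb, ha⟩ | ⟨hb, ha⟩ | ⟨hb, ha⟩ <;>
        rw [hb, ha] <;> decide
    | none =>
      rw [dite_eq_ite, pv_cond_eq]
      by_cases h2 : (decide (1 < (cs.takeWhile (· ≠ '@')).length)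
          && ((PySem.List.pyGet? (cs.takeWhile (· ≠ '@')) 0).getD ' ' == '_')
          && PySem.Chars.isalpha ((PySem.List.pyGet? (cs.takeWhile (· ≠ '@')) 1).getD ' ')) = true
      · simp only [if_pos h2]
        rcases hsh : cs.takeWhile (· ≠ '@') with _ | ⟨b0, _ | ⟨b1, t⟩⟩ <;> rw [hsh] at h2
        · simp at h2
        · simp at h2
        · simp only [pv_get1, Option.getD_some, Bool.and_eq_true, beq_iff_eq,
            decide_eq_true_eq] at h2
          have hno : '@' ∉ b1 :: t := by
            intro hx
            exact pv_no_at cs (hsh ▸ List.mem_cons_of_mem b0 hx)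
          simp only [List.drop_succ_cons, List.drop_zero]
          exact pv_fix b1 t hno h2.2
      · simp only [if_neg h2]

-- ===== VERDICT (by name: the statement is the Claim_ definition above) =====
theorem canonical_op_name_py_spec : Claim_equal_canonical_op_name_py := by
  intro callee _ hP
  unfold Pre_canonical_op_name_py at hP
  unfold Spec_canonical_op_name_py canonical_op_name_py canonical_op_name_py_alt
  rw [pv_main callee.toList hP]
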